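-- pv_equiv track=rewrite | github.com/jacoballen4534/SonicGuessr | song-guesser-scripts/get-top-100-for-year.py | parse_song
-- ===== SOURCE A (Python) =====
-- def parse_song(song_title):
--     # ... (your existing parse_song function - kept as is from your provided version) ...
--     parsed_title = song_title
--     title_truncate_separators = [" (", "[", " /", " - "]
--
--     split_index = len(parsed_title)
--     for sep in title_truncate_separators:
--         idx = parsed_title.find(sep)
--         if idx != -1:
--             split_index = min(split_index, idx)
--
--     parsed_title = parsed_title[:split_index].strip()
--
--     if parsed_title.startswith('"') and parsed_title.endswith('"'):
--         parsed_title = parsed_title[1:-1]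
--
--     return parsed_title.strip()
-- ===== SOURCE B (Python) =====
-- def parse_song(song_title):
--     # One left-to-right scan: stop at the first position where any separator starts.
--     seps = (" (", "[", " /", " - ")
--     head = song_title
--     for i in range(len(song_title)):
--         if song_title.startswith(seps, i):
--             head = song_title[:i]
--             break
--     parsed = head.strip()
--     if parsed.startswith('"') and parsed.endswith('"'):
--         parsed = parsed[1:-1]
--     return parsed.strip()
-- ===== Notes on version B (the rewrite author's own statement) =====
-- stated objective: idiomatic
-- what changed: A scans the whole string once per separator with str.find and takes the min of the hit indices; B makes a single left-to-right pass over the positions, truncating at the first position where any separator starts (startswith with an offset, break), with the same strip/quote-strip tail.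
import Mathlib
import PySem

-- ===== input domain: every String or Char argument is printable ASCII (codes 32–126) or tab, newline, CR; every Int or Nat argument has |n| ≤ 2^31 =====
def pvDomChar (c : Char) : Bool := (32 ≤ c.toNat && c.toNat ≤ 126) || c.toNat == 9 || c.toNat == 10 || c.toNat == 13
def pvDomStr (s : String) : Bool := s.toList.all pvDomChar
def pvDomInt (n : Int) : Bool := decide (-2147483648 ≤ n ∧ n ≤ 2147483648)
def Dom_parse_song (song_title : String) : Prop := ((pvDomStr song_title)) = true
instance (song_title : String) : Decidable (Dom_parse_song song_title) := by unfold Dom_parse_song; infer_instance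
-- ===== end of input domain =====

-- B replaces A's four full `find` scans + min with a single left-to-right scan that
-- stops at the first position where any separator starts (idiomatic one-pass shape);
-- the quote-stripping tail is unchanged.

-- ===== PORT A =====
-- A: for each separator, find its first occurrence in the whole string; split_index = min of the hits.
def parse_song (song_title : String) : String :=
  let parsed_title := song_title
  let title_truncate_separators : List String := [" (", "[", " /", " - "]
  let split_index : Int :=
    title_truncate_separators.foldl
      (fun split_index sep =>
        let idx := PySem.Str.find parsed_title sep
        if idx ≠ -1 then min split_index idx else split_index)
      (PySem.Str.len parsed_title)
  let parsed_title := PySem.Str.strip (PySem.Str.slice parsed_title none (some split_index))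
  let parsed_title :=
    if PySem.Str.startswith parsed_title "\"" && PySem.Str.endswith parsed_title "\"" then
      PySem.Str.slice parsed_title (some 1) (some (-1))
    else parsed_title
  PySem.Str.strip parsed_title

-- ===== PORT B =====
def pvSeps : List (List Char) := [[' ', '('], ['['], [' ', '/'], [' ', '-', ' ']]

-- Source B's `song_title.startswith(seps, i)` on the remainder at position i
def pvStartsAny (cs : List Char) : Bool :=
  pvSeps.any (fun p => PySem.Chars.startswith cs p)

-- Source B's indexed loop with break, transcribed as the structural scan over the
-- characters: at each position test whether a separator starts there.
def pvTruncB : List Char → List Char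
  | [] => []
  | c :: rest => if pvStartsAny (c :: rest) then [] else c :: pvTruncB rest

def parse_song_alt (song_title : String) : String :=
  let parsed := String.ofList (pvTruncB song_title.toList)
  let parsed := PySem.Str.strip parsed
  let parsed :=
    if PySem.Str.startswith parsed "\"" && PySem.Str.endswith parsed "\"" then
      PySem.Str.slice parsed (some 1) (some (-1))
    else parsed
  PySem.Str.strip parsed

-- ===== PRECONDITION & SPEC =====
def Spec_parse_song (song_title : String) (out : String) : Prop := out = parse_song_alt song_title
instance (song_title : String) (out : String) : Decidable (Spec_parse_song song_title out) := by unfold Spec_parse_song; infer_instance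

-- ===== CLAIM (what is proved, stated in full; the proofs are below) =====
def Claim_equal_parse_song : Prop := ∀ (song_title : String), Dom_parse_song song_title → Spec_parse_song song_title (parse_song song_title)

-- ===== LEMMAS AND PROOFS =====

-- A separator matches at position i
def MatchAt (cs : List Char) (i : Nat) : Prop := ∃ p ∈ pvSeps, p <+: cs.drop i

lemma startsAny_iff (cs : List Char) : pvStartsAny cs = true ↔ MatchAt cs 0 := by
  simp [pvStartsAny, MatchAt, List.any_eq_true, PySem.Chars.startswith_iff]

lemma matchAt_succ (c : Char) (rest : List Char) (j : Nat) :
    MatchAt (c :: rest) (j + 1) ↔ MatchAt rest j := by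
  simp [MatchAt, List.drop_succ_cons]

-- B's scan returns take n, for n the first match position (or the length)
lemma truncB_take : ∀ (cs : List Char) (n : Nat),
    (∀ j, j < n → ¬ MatchAt cs j) → (n = cs.length ∨ MatchAt cs n) →
    pvTruncB cs = cs.take n := by
  intro cs
  induction cs with
  | nil => intro n _ _; simp [pvTruncB]
  | cons c rest ih =>
    intro n hno hend
    by_cases h0 : MatchAt (c :: rest) 0
    · have hn : n = 0 := by
        by_contra hne
        exact hno 0 (Nat.pos_of_ne_zero hne) h0
      simp [pvTruncB, (startsAny_iff _).mpr h0, hn]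
    · have hne : n ≠ 0 := by
        rintro rfl
        rcases hend with h | h
        · simp at h
        · exact h0 h
      obtain ⟨m, rfl⟩ := Nat.exists_eq_succ_of_ne_zero hne
      have hstart : pvStartsAny (c :: rest) ≠ true := fun h => h0 ((startsAny_iff _).mp h)
      have hno' : ∀ j, j < m → ¬ MatchAt rest j := fun j hj hm =>
        hno (j + 1) (by omega) ((matchAt_succ c rest j).mpr hm)
      have hend' : m = rest.length ∨ MatchAt rest m := by
        rcases hend with h | h
        · left; simpa using h
        · right; exact (matchAt_succ c rest m).mp h
      simp [pvTruncB, hstart, ih m hno' hend']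

-- A's foldl over the separator list
def pvFold (s : String) (L : List String) (acc : Int) : Int :=
  L.foldl
    (fun split_index sep =>
      let idx := PySem.Str.find s sep
      if idx ≠ -1 then min split_index idx else split_index)
    acc

lemma pvFold_le_acc (s : String) : ∀ (L : List String) (acc : Int), pvFold s L acc ≤ acc := by
  intro L
  induction L with
  | nil => intro acc; simp [pvFold]
  | cons q L ih =>
    intro acc
    simp only [pvFold, List.foldl_cons]
    split
    · exact le_trans (ih _) (min_le_left _ _)
    · exact ih acc

lemma pvFold_le_find (s : String) : ∀ (L : List String) (acc : Int) (q : String), q ∈ L →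
    PySem.Str.find s q ≠ -1 → pvFold s L acc ≤ PySem.Str.find s q := by
  intro L
  induction L with
  | nil => intro acc q hq; simp at hq
  | cons r L ih =>
    intro acc q hq hfind
    rcases List.mem_cons.mp hq with rfl | hq
    · simp only [pvFold, List.foldl_cons, if_pos hfind]
      exact le_trans (pvFold_le_acc s L _) (min_le_right _ _)
    · simp only [pvFold, List.foldl_cons]
      split
      · exact ih _ q hq hfind
      · exact ih _ q hq hfind

lemma pvFold_cons (s r : String) (L : List String) (acc : Int) :
    pvFold s (r :: L) acc
      = pvFold s L (if PySem.Str.find s r ≠ -1 then min acc (PySem.Str.find s r) else acc) := rfl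

lemma pvFold_cases (s : String) : ∀ (L : List String) (acc : Int),
    pvFold s L acc = acc ∨
      ∃ q ∈ L, PySem.Str.find s q ≠ -1 ∧ pvFold s L acc = PySem.Str.find s q := by
  intro L
  induction L with
  | nil => intro acc; left; simp [pvFold]
  | cons r L ih =>
    intro acc
    rw [pvFold_cons]
    by_cases hf : PySem.Str.find s r ≠ -1
    · rw [if_pos hf]
      rcases ih (min acc (PySem.Str.find s r)) with h | ⟨q, hq, hfq, h⟩
      · rcases min_cases acc (PySem.Str.find s r) with ⟨hm, _⟩ | ⟨hm, _⟩
        · left; rw [h, hm]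
        · right; exact ⟨r, List.mem_cons_self, hf, by rw [h, hm]⟩
      · right; exact ⟨q, List.mem_cons_of_mem _ hq, hfq, h⟩
    · rw [if_neg hf]
      rcases ih acc with h | ⟨q, hq, hfq, h⟩
      · left; exact h
      · right; exact ⟨q, List.mem_cons_of_mem _ hq, hfq, h⟩

-- find specs specialised from findFrom at 0
lemma find_spec (cs p : List Char) (h : PySem.Chars.find cs p ≠ -1) :
    0 ≤ PySem.Chars.find cs p ∧ p <+: cs.drop (PySem.Chars.find cs p).toNat ∧
      ∀ i : Nat, i < (PySem.Chars.find cs p).toNat → ¬ p <+: cs.drop i := by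
  have h0 : PySem.Chars.findFrom cs p ((0 : Nat) : Int) = PySem.Chars.find cs p := by
    simp [PySem.Chars.findFrom_zero]
  have := PySem.Chars.findFrom_natCast_spec cs p 0 (Nat.zero_le _) (by rw [h0]; exact h)
  rw [h0] at this
  exact ⟨by exact_mod_cast this.1, this.2.1, fun i hi => this.2.2 i (Nat.zero_le _) hi⟩

lemma find_ne_neg_one (cs p : List Char) (j : Nat) (hp : p <+: cs.drop j) :
    PySem.Chars.find cs p ≠ -1 := by
  have h0 : PySem.Chars.findFrom cs p ((0 : Nat) : Int) = PySem.Chars.find cs p := by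
    simp [PySem.Chars.findFrom_zero]
  intro hcontra
  have := (PySem.Chars.findFrom_natCast_eq_neg_one_iff cs p 0 (Nat.zero_le _)).mp
    (by rw [h0]; exact hcontra)
  simp only [List.drop_zero] at this
  exact this (hp.isInfix.trans (List.drop_suffix j cs).isInfix)

lemma sepsStr_toList : ∀ q ∈ ([" (", "[", " /", " - "] : List String), q.toList ∈ pvSeps := by
  decide

lemma pvSeps_toStr : ∀ p ∈ pvSeps, ∃ q ∈ ([" (", "[", " /", " - "] : List String), q.toList = p := by
  decide

-- the heart: A's truncated slice equals B's scan
lemma slice_eq_truncB (s : String) :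
    PySem.Str.slice s none (some (List.foldl
        (fun split_index sep =>
          if PySem.Str.find s sep ≠ -1 then min split_index (PySem.Str.find s sep)
          else split_index)
        (PySem.Str.len s) [" (", "[", " /", " - "]))
      = String.ofList (pvTruncB s.toList) := by
  show PySem.Str.slice s none (some (pvFold s [" (", "[", " /", " - "] (PySem.Str.len s)))
      = String.ofList (pvTruncB s.toList)
  set L : List String := [" (", "[", " /", " - "] with hL
  set si := pvFold s L (PySem.Str.len s) with hsi
  have hlen : PySem.Str.len s = ((s.toList.length : Nat) : Int) := PySem.Str.len_eq s
  have hnonneg : 0 ≤ si := by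
    rcases pvFold_cases s L (PySem.Str.len s) with h | ⟨q, hq, hf, h⟩
    · rw [hsi, h, hlen]; positivity
    · rw [hsi, h, PySem.Str.find_eq]
      exact (find_spec _ _ (by rwa [PySem.Str.find_eq] at hf)).1
  -- no match strictly before si.toNat
  have hno : ∀ j, j < si.toNat → ¬ MatchAt s.toList j := by
    intro j hj ⟨p, hp, hpre⟩
    obtain ⟨q, hq, rfl⟩ := pvSeps_toStr p hp
    have hfind : PySem.Chars.find s.toList q.toList ≠ -1 := find_ne_neg_one _ _ j hpre
    have hmin := (find_spec s.toList q.toList hfind).2.2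
    have hge : (PySem.Chars.find s.toList q.toList).toNat ≤ j := by
      by_contra hlt
      exact hmin j (by omega) hpre
    have hsile : si ≤ PySem.Chars.find s.toList q.toList := by
      have := pvFold_le_find s L (PySem.Str.len s) q hq (by rwa [PySem.Str.find_eq])
      rwa [PySem.Str.find_eq] at this
    omega
  have hend : si.toNat = s.toList.length ∨ MatchAt s.toList si.toNat := by
    rcases pvFold_cases s L (PySem.Str.len s) with h | ⟨q, hq, hf, h⟩
    · left; rw [hsi, h, hlen]; simp
    · right
      rw [PySem.Str.find_eq] at hf
      refine ⟨q.toList, sepsStr_toList q hq, ?_⟩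
      have := (find_spec s.toList q.toList hf).2.1
      rw [hsi, h, PySem.Str.find_eq]
      exact this
  have htrunc := truncB_take s.toList si.toNat hno hend
  have hlist : (PySem.Str.slice s none (some si)).toList
      = (String.ofList (pvTruncB s.toList)).toList := by
    rw [PySem.Str.toList_slice]
    simp only [PySem.Chars.slice_eq_listSlice]
    rw [PySem.List.slice_to _ hnonneg, htrunc]
    simp
  exact String.toList_injective hlist

-- ===== VERDICT (by name: the statement is the Claim_ definition above) =====
theorem parse_song_spec : Claim_equal_parse_song := by
  intro s _
  simp only [Spec_parse_song, parse_song, parse_song_alt]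
  rw [slice_eq_truncB s]
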